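/- GENERATED by tools/from_farm_form.py from prooffarm-gif/accepted/DGifGetImageDesc.5/Proof.lean (a worked proof of the farm's unit `DGifGetImageDesc.5`,
   accepted by the verdict) — do not edit. -/
import Gif.Spec.Units.DGifGetImageDesc_5
import Gif.Spec.AllSegs
import Gif.Spec.Proved.DGifGetImageDesc_5_Lemmas

open X86 X86.User Asan ProgX.Base ProgX.Base.Spec Gif.Spec

/-!
  `DGifGetImageDesc.5` (0x109535 … 0x109583 and 0x10961e … 0x109638, 24 instructions; dgif_lib.c:463-470): the deep copy of the local
  colour map into the uncounted slot of the SavedImages array. Three paths: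

      no local map (`Fc.icm = none`)        0x109535 … `je` … 0x109583                                  `Slot`, `cm = none`
      a local map, the copy succeeded       0x109535 … GifMakeMapObject … 0x10956a … 0x109583           `Slot`, `cm = some m`, the grown heap
      a local map, the copy failed          0x109535 … GifMakeMapObject … 0x10956a … 0x10961e … 0x10949a  `Done`, GIF_ERROR

  The return address of `GifMakeMapObject`, 0x10956a (`ret14`), is a cut of this unit's own (`seg5_AtRet14`); the walks are in
  Lemmas.lean, chained here.
-/

/-- Segment 5 of `DGifGetImageDesc` takes `AfterCopy` at 0x109535 to `Slot` at 0x109583 or to `Done` at 0x10949a. -/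
theorem Gif.Spec.Proved.DGifGetImageDesc_5_ok : Gif.Spec.DGifGetImageDesc_5.Statement := by
  unfold Gif.Spec.DGifGetImageDesc_5.Statement
  intro Lay hLay μ hμ u₀ hcode h_GifMakeMapObject h_asan_load8_noabort h_asan_load4_noabort h_asan_store8_noabort
    h_asan_store4_noabort H rest frames F R e ret Hc Fc v hat
  cases hicm : Fc.icm with
  | none =>
    -- dgif_lib.c:463 `GifFile->Image.ColorMap == NULL`: 0x109535 … 0x109583
    exact Gif.Spec.DGifGetImageDesc_5.seg5_null Lay hLay μ hμ u₀ hcode h_asan_load8_noabort H rest frames F R e ret Hc Fc v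
      hat hicm
  | some mp =>
    -- the callee's contract for the present heap and the map's count
    have hmake := h_GifMakeMapObject Hc rest frames mp.count
    -- 0x109535 … the call of GifMakeMapObject … 0x10956a
    refine (Gif.Spec.DGifGetImageDesc_5.seg5_call Lay hLay μ hμ u₀ hcode h_asan_load8_noabort h_asan_load4_noabort
      H rest frames F R e ret Hc Fc mp hmake v hat hicm).trans ?_
    intro v1 hv1
    obtain ⟨H', hmid, hslot, hres⟩ := hv1
    obtain ⟨s, hsaved, hroom, hrbp⟩ := hslot
    obtain ⟨cm, hmap, hown⟩ := hres
    cases cm with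
    | none =>
      -- dgif_lib.c:467-469 the copy failed: 0x10956a … 0x10961e … 0x10949a
      exact Gif.Spec.DGifGetImageDesc_5.seg5_tail_null Lay hLay μ hμ u₀ hcode h_asan_store8_noabort h_asan_store4_noabort
        H rest frames F R e ret H' Fc v1 s hmid hsaved hroom hrbp hmap
    | some m =>
      -- dgif_lib.c:464 the copy succeeded: 0x10956a … 0x109583
      exact Gif.Spec.DGifGetImageDesc_5.seg5_tail_map Lay hLay μ hμ u₀ hcode h_asan_store8_noabort
        H rest frames F R e ret H' Fc v1 s m hmid hsaved hroom hrbp hmap hown
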